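-- pv_equiv track=rewrite | github.com/jameslawlor/advent-of-code-python | src/advent_of_code/2023/day_01.py | find_first_and_last_patterns
-- ===== SOURCE A (Python) =====
-- def find_first_and_last_patterns(patterns_and_their_indices):
--     # find highest and lowest indices
--     lowest_index = None
--     highest_index = None
--     char_at_lowest = ""
--     char_at_highest = ""
--     for pattern, indices in patterns_and_their_indices.items():
--         if indices:
--             tmp_lowest_index = min(indices)
--             tmp_highest_index = max(indices)
--
--             if lowest_index is None or tmp_lowest_index < lowest_index:
--                 lowest_index = tmp_lowest_index
--                 char_at_lowest = pattern
--
--             if highest_index is None or tmp_highest_index > highest_index: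
--                 highest_index = tmp_highest_index
--                 char_at_highest = pattern
--
--     return (char_at_lowest, char_at_highest)
-- ===== SOURCE B (Python) =====
-- def find_first_and_last_patterns(patterns_and_their_indices):
--     # build-then-reduce: flatten to (index, pattern) pairs, then one min and one max
--     pairs = [
--         (i, pattern)
--         for pattern, indices in patterns_and_their_indices.items()
--         for i in indices
--     ]
--     if not pairs:
--         return ("", "")
--     lo = min(pairs, key=lambda p: p[0])
--     hi = max(pairs, key=lambda p: p[0])
--     return (lo[1], hi[1])
-- ===== Notes on version B (the rewrite author's own statement) =====
-- stated objective: simpler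
-- what changed: Replaced the manual running-min/max state machine (four mutable variables updated per dict entry) with a build-then-reduce decomposition: flatten to a list of (index, pattern) pairs, then one min and one max with a key, relying on min/max returning the first extremal pair for the same first-wins tie-breaking.
import Mathlib
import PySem

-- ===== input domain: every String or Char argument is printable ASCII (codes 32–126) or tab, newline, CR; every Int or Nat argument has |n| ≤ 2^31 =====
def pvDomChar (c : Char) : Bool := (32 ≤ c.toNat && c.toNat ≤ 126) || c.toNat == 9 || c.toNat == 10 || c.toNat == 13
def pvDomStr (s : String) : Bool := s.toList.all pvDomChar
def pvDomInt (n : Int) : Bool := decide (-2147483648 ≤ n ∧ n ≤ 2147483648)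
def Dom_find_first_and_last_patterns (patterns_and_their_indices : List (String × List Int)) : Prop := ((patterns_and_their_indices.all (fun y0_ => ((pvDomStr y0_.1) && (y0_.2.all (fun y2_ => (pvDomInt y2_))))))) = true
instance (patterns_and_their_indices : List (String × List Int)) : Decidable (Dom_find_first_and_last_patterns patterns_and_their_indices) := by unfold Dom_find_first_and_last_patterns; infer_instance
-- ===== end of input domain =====

-- B replaces A's running-min/max state machine with a build-then-reduce decomposition
-- (flatten to (index, pattern) pairs, then one min and one max with a key); objective: simpler.

-- ===== PORT A =====
-- literal transliteration: the loop carries (lowest_index, highest_index, char_at_lowest, char_at_highest);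
-- min(indices)/max(indices) are PySem.List.min?/max? — '.getD 0' is unreachable since indices is nonempty there.
def find_first_and_last_patterns (patterns_and_their_indices : List (String × List Int)) : String × String :=
  let r := patterns_and_their_indices.foldl
    (fun (st : Option Int × Option Int × String × String) pi =>
      if pi.2.isEmpty then st
      else
        let tmp_lowest_index := (PySem.List.min? pi.2 (fun x => x)).getD 0
        let tmp_highest_index := (PySem.List.max? pi.2 (fun x => x)).getD 0
        let lc : Option Int × String :=
          match st.1 with
          | none => (some tmp_lowest_index, pi.1)
          | some v => if tmp_lowest_index < v then (some tmp_lowest_index, pi.1) else (st.1, st.2.2.1)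
        let hc : Option Int × String :=
          match st.2.1 with
          | none => (some tmp_highest_index, pi.1)
          | some v => if v < tmp_highest_index then (some tmp_highest_index, pi.1) else (st.2.1, st.2.2.2)
        (lc.1, hc.1, lc.2, hc.2))
    (none, none, "", "")
  (r.2.2.1, r.2.2.2)

-- ===== PORT B =====
def find_first_and_last_patterns_alt (patterns_and_their_indices : List (String × List Int)) : String × String :=
  let pairs : List (Int × String) := patterns_and_their_indices.foldl
    (fun acc pi => acc ++ pi.2.map (fun i => (i, pi.1))) []
  match PySem.List.min? pairs Prod.fst, PySem.List.max? pairs Prod.fst with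
  | some lo, some hi => (lo.2, hi.2)
  | _, _ => ("", "")

-- ===== PRECONDITION & SPEC =====
def Spec_find_first_and_last_patterns (patterns_and_their_indices : List (String × List Int)) (out : String × String) : Prop := out = find_first_and_last_patterns_alt patterns_and_their_indices
instance (patterns_and_their_indices : List (String × List Int)) (out : String × String) : Decidable (Spec_find_first_and_last_patterns patterns_and_their_indices out) := by unfold Spec_find_first_and_last_patterns; infer_instance

-- ===== CLAIM (what is proved, stated in full; the proofs are below) =====
def Claim_equal_find_first_and_last_patterns : Prop := ∀ (patterns_and_their_indices : List (String × List Int)), Dom_find_first_and_last_patterns patterns_and_their_indices → Spec_find_first_and_last_patterns patterns_and_their_indices (find_first_and_last_patterns patterns_and_their_indices)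

-- ===== LEMMAS AND PROOFS =====

-- A's per-entry update, as a named function (definitionally the fold step of port A)
def pvStepA (st : Option Int × Option Int × String × String) (pi : String × List Int) :
    Option Int × Option Int × String × String :=
  if pi.2.isEmpty then st
  else
    let tmp_lowest_index := (PySem.List.min? pi.2 (fun x => x)).getD 0
    let tmp_highest_index := (PySem.List.max? pi.2 (fun x => x)).getD 0
    let lc : Option Int × String :=
      match st.1 with
      | none => (some tmp_lowest_index, pi.1)
      | some v => if tmp_lowest_index < v then (some tmp_lowest_index, pi.1) else (st.1, st.2.2.1)
    let hc : Option Int × String :=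
      match st.2.1 with
      | none => (some tmp_highest_index, pi.1)
      | some v => if v < tmp_highest_index then (some tmp_highest_index, pi.1) else (st.2.1, st.2.2.2)
    (lc.1, hc.1, lc.2, hc.2)

-- the fold step of PySem.List.min? / max? with key Prod.fst
def pvMinStep (acc : Option (Int × String)) (q : Int × String) : Option (Int × String) :=
  match acc with
  | none => some q
  | some m => if q.1 < m.1 then some q else some m

def pvMaxStep (acc : Option (Int × String)) (q : Int × String) : Option (Int × String) :=
  match acc with
  | none => some q
  | some m => if m.1 < q.1 then some q else some m

-- the coupling between A's state and the two optional best-so-far pairs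
def pvConv (mn mx : Option (Int × String)) : Option Int × Option Int × String × String :=
  (mn.map Prod.fst, mx.map Prod.fst, (mn.map Prod.snd).getD "", (mx.map Prod.snd).getD "")

def pvChunk (pi : String × List Int) : List (Int × String) := pi.2.map (fun i => (i, pi.1))

theorem pvFoldlMin_min (t : List Int) (a b : Int) :
    t.foldl min (min a b) = min a (t.foldl min b) := by
  induction t generalizing b with
  | nil => rfl
  | cons c t ih =>
    simp only [List.foldl_cons]
    rw [min_assoc, ih]

theorem pvFoldlMax_max (t : List Int) (a b : Int) :
    t.foldl max (max a b) = max a (t.foldl max b) := by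
  induction t generalizing b with
  | nil => rfl
  | cons c t ih =>
    simp only [List.foldl_cons]
    rw [max_assoc, ih]

-- heart of the proof, min side: scanning one pattern's indices pairwise equals
-- A's single comparison against min(indices)
theorem pvChunkMin (p : String) (x : Int) (t : List Int) (m : Option (Int × String)) :
    ((x :: t).map (fun i => (i, p))).foldl pvMinStep m =
      match m with
      | none => some (t.foldl min x, p)
      | some q => if t.foldl min x < q.1 then some (t.foldl min x, p) else some q := by
  induction t generalizing x m with
  | nil =>
    cases m with
    | none => rfl
    | some q => simp [pvMinStep]
  | cons y t ih =>
    have step : ((x :: y :: t).map (fun i => (i, p))).foldl pvMinStep m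
        = ((y :: t).map (fun i => (i, p))).foldl pvMinStep (pvMinStep m (x, p)) := by
      simp [List.foldl_cons]
    rw [step, ih]
    have hmin : (y :: t).foldl min x = min x (t.foldl min y) := by
      simpa using pvFoldlMin_min t x y
    rw [hmin]
    cases m <;>
      simp only [pvMinStep] <;>
      split_ifs <;>
      first
        | rfl
        | (simp only [Option.some.injEq, Prod.mk.injEq, min_def] at * ;
           split_ifs at * <;> simp_all <;> omega)

theorem pvChunkMax (p : String) (x : Int) (t : List Int) (m : Option (Int × String)) :
    ((x :: t).map (fun i => (i, p))).foldl pvMaxStep m =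
      match m with
      | none => some (t.foldl max x, p)
      | some q => if q.1 < t.foldl max x then some (t.foldl max x, p) else some q := by
  induction t generalizing x m with
  | nil =>
    cases m with
    | none => rfl
    | some q => simp [pvMaxStep]
  | cons y t ih =>
    have step : ((x :: y :: t).map (fun i => (i, p))).foldl pvMaxStep m
        = ((y :: t).map (fun i => (i, p))).foldl pvMaxStep (pvMaxStep m (x, p)) := by
      simp [List.foldl_cons]
    rw [step, ih]
    have hmax : (y :: t).foldl max x = max x (t.foldl max y) := by
      simpa using pvFoldlMax_max t x y
    rw [hmax]
    cases m <;>
      simp only [pvMaxStep] <;>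
      split_ifs <;>
      first
        | rfl
        | (simp only [Option.some.injEq, Prod.mk.injEq, max_def] at * ;
           split_ifs at * <;> simp_all <;> omega)

-- one A-step from the coupled state lands on the coupled state of the scanned chunk
theorem pvStepA_conv (mn mx : Option (Int × String)) (pi : String × List Int) :
    pvStepA (pvConv mn mx) pi = pvConv (pvChunk pi |>.foldl pvMinStep mn) (pvChunk pi |>.foldl pvMaxStep mx) := by
  obtain ⟨p, indices⟩ := pi
  cases indices with
  | nil => rfl
  | cons x t =>
    have hne : ¬ ((x :: t : List Int).isEmpty = true) := by simp
    have hmin : (PySem.List.min? (x :: t) (fun y => y)).getD 0 = t.foldl min x := by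
      rw [PySem.List.min?_id_cons]; rfl
    have hmax : (PySem.List.max? (x :: t) (fun y => y)).getD 0 = t.foldl max x := by
      rw [PySem.List.max?_id_cons]; rfl
    show pvStepA (pvConv mn mx) (p, x :: t) = _
    rw [pvStepA, if_neg hne]
    simp only [pvChunk, hmin, hmax, pvChunkMin p x t mn, pvChunkMax p x t mx]
    cases mn <;> cases mx <;>
      simp only [pvConv, Option.map_some, Option.map_none, Option.getD_some, Option.getD_none] <;>
      split_ifs <;> rfl

-- folding A's loop equals folding the flattened pair stream, through the coupling
theorem pvFold_conv (l : List (String × List Int)) (mn mx : Option (Int × String)) :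
    l.foldl pvStepA (pvConv mn mx) =
      pvConv ((l.flatMap pvChunk).foldl pvMinStep mn) ((l.flatMap pvChunk).foldl pvMaxStep mx) := by
  induction l generalizing mn mx with
  | nil => rfl
  | cons pi l ih =>
    simp only [List.foldl_cons, List.flatMap_cons, List.foldl_append]
    rw [pvStepA_conv, ih]

-- the two ports, re-expressed through the proof-side helpers (definitional)
theorem pvPortA_eq (l : List (String × List Int)) :
    find_first_and_last_patterns l =
      ((l.foldl pvStepA (none, none, "", "")).2.2.1, (l.foldl pvStepA (none, none, "", "")).2.2.2) := rfl

def pvReduce (pairs : List (Int × String)) : String × String :=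
  match PySem.List.min? pairs Prod.fst, PySem.List.max? pairs Prod.fst with
  | some lo, some hi => (lo.2, hi.2)
  | _, _ => ("", "")

theorem pvPortB_eq (l : List (String × List Int)) :
    find_first_and_last_patterns_alt l = pvReduce (l.flatMap pvChunk) := by
  have hp : List.foldl (fun (acc : List (Int × String)) x => acc ++ pvChunk x) [] l = l.flatMap pvChunk := by
    simpa using PySem.List.foldl_append_eq_flatMap pvChunk l []
  show pvReduce (List.foldl (fun (acc : List (Int × String)) x => acc ++ pvChunk x) [] l) = _
  rw [hp]

theorem pvMin?_eq (pairs : List (Int × String)) :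
    PySem.List.min? pairs Prod.fst = pairs.foldl pvMinStep none := by
  rw [PySem.List.min?]
  congr 1
  funext acc x
  cases acc <;> rfl

theorem pvMax?_eq (pairs : List (Int × String)) :
    PySem.List.max? pairs Prod.fst = pairs.foldl pvMaxStep none := by
  rw [PySem.List.max?]
  congr 1
  funext acc x
  cases acc <;> rfl

-- ===== VERDICT (by name: the statement is the Claim_ definition above) =====
theorem find_first_and_last_patterns_spec : Claim_equal_find_first_and_last_patterns := by
  intro l _
  show find_first_and_last_patterns l = find_first_and_last_patterns_alt l
  rw [pvPortA_eq, pvPortB_eq,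
    show ((none, none, "", "") : Option Int × Option Int × String × String) = pvConv none none from rfl,
    pvFold_conv l none none]
  simp only [pvReduce, pvMin?_eq, pvMax?_eq]
  cases hm : (l.flatMap pvChunk).foldl pvMinStep none with
  | none =>
    cases hx : (l.flatMap pvChunk).foldl pvMaxStep none with
    | none => rfl
    | some q =>
      -- impossible: the min-fold is none only on the empty pair list, where the max-fold is none too
      have hnil : l.flatMap pvChunk = [] :=
        (PySem.List.min?_eq_none_iff (l.flatMap pvChunk) Prod.fst).mp ((pvMin?_eq _).trans hm)
      rw [hnil] at hx
      simp [List.foldl] at hx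
  | some q =>
    cases hx : (l.flatMap pvChunk).foldl pvMaxStep none with
    | none =>
      have hnil : l.flatMap pvChunk = [] :=
        (PySem.List.max?_eq_none_iff (l.flatMap pvChunk) Prod.fst).mp ((pvMax?_eq _).trans hx)
      rw [hnil] at hm
      simp [List.foldl] at hm
    | some r => rfl
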